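-- pv_equiv track=rewrite | github.com/jcraig949jfi/Prometheus | cartography/shared/scripts/v2/tau_extend.py | compute_tau_sieve
-- ===== SOURCE A (Python) =====
-- def compute_tau_sieve(N, tau_primes):
--     """
--     Compute tau(n) for n=1..N using known tau(p) values and multiplicativity.
--
--     tau_primes: dict {p: tau(p)} for primes p
--     """
--     tau = {1: 1}
--
--     # Compute tau(p^k) for all prime powers
--     primes = sorted(tau_primes.keys())
--     for p in primes:
--         tau[p] = tau_primes[p]
--         pk = p * p
--         while pk <= N:
--             # tau(p^{k+1}) = tau(p)*tau(p^k) - p^11*tau(p^{k-1})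
--             tau[pk] = tau[p] * tau[pk // p] - p**11 * tau[pk // (p * p)]
--             pk *= p
--
--     # Extend by multiplicativity using sieve
--     # For each n, find its factorization and compute tau(n) = prod tau(p^k)
--     for n in range(2, N + 1):
--         if n in tau:
--             continue
--         m = n
--         result = 1
--         computable = True
--         for p in primes:
--             if p * p > m:
--                 break
--             if m % p == 0:
--                 pk = 1
--                 while m % p == 0:
--                     pk *= p
--                     m //= p
--                 if pk not in tau:
--                     computable = False
--                     break
--                 result *= tau[pk]
--         if not computable:
--             continue
--         if m > 1:
--             # m is a remaining prime factor
--             if m in tau_primes: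
--                 result *= tau_primes[m]
--             else:
--                 continue  # Can't compute
--         tau[n] = result
--
--     return tau
-- ===== SOURCE B (Python) =====
-- def compute_tau_sieve(N, tau_primes):
--     """
--     Compute tau(n) for n=1..N using known tau(p) values and multiplicativity.
--
--     Smallest-known-factor sieve: one sieve pass records, for each n <= N, the
--     smallest known prime dividing it; each n is then factored in O(log n)
--     instead of scanning the whole prime list.
--     """
--     tau = {1: 1}
--
--     primes = sorted(tau_primes.keys())
--     for p in primes:
--         tau[p] = tau_primes[p]
--         pk = p * p
--         while pk <= N:
--             tau[pk] = tau[p] * tau[pk // p] - p**11 * tau[pk // (p * p)]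
--             pk *= p
--
--     # spf[m] = smallest known prime dividing m (0 if none): iterate primes
--     # largest first so the smallest prime wins.
--     spf = [0] * (N + 1)
--     for p in reversed(primes):
--         for mult in range(p, N + 1, p):
--             spf[mult] = p
--
--     for n in range(2, N + 1):
--         if n in tau:
--             continue
--         m = n
--         result = 1
--         while m > 1:
--             q = spf[m]
--             if q == 0 or q * q > m:
--                 break
--             pk = 1
--             while m % q == 0:
--                 pk *= q
--                 m //= q
--             result *= tau[pk]
--         if m > 1:
--             # m is a remaining prime factor
--             if m in tau_primes:
--                 result *= tau_primes[m]
--             else: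
--                 continue  # Can't compute
--         tau[n] = result
--
--     return tau
-- ===== Notes on version B (the rewrite author's own statement) =====
-- stated objective: alternative
-- what changed: A factors each n by scanning the whole sorted prime list with trial division; B makes one smallest-known-factor sieve pass over [2..N] and then factors each n by repeated smallest-factor lookup (intended as faster; a timing run measured only about 1.4x at the largest size).
-- outside the precondition, e.g. on compute_tau_sieve(-3, {-1: 5}): A returns {1: 1, -1: 5}, B raises IndexError
import Mathlib
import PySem

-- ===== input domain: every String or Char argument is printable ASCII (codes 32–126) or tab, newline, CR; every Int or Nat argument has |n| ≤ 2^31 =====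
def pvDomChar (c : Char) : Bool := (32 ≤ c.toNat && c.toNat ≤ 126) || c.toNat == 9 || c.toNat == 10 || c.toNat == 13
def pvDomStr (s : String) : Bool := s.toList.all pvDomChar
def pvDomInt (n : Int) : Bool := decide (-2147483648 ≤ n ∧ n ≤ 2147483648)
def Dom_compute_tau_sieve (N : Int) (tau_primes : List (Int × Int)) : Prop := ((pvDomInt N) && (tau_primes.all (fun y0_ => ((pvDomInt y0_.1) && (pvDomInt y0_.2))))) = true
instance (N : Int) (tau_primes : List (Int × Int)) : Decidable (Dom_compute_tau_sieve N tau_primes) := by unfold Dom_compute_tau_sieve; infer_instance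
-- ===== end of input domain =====

-- B replaces A's per-n scan of the whole prime list by a smallest-known-factor
-- sieve, factoring each n in O(log n); return value only (no mutation).

-- ===== PORT A =====
-- prime-power phase 'tau[p] = ...; pk = p*p; while pk <= N: ...' — these lines
-- are textually identical in A and in B, so both ports share this helper.
def tauPowLoop (N p : Int) (tau : PySem.Dict Int Int) (pk : Int) : Nat → PySem.Dict Int Int
  | 0 => tau
  | fuel+1 =>
    if pk ≤ N then
      tauPowLoop N p
        (tau.insert pk (tau.getD p 0 * tau.getD (PySem.Int.floordiv pk p) 0 -
          p ^ 11 * tau.getD (PySem.Int.floordiv pk (p * p)) 0))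
        (pk * p) fuel
    else tau

def tauPowers (N : Int) (tp : PySem.Dict Int Int) (primes : List Int) : PySem.Dict Int Int :=
  primes.foldl (fun tau p => tauPowLoop N p (tau.insert p (tp.getD p 0)) (p * p) (N + 1).toNat)
    (PySem.Dict.ofList [(1, 1)])

-- 'pk = 1; while m % p == 0: pk *= p; m //= p' — identical inner loop in both
-- Pythons, shared; returns (pk, m).
def divOut (q : Int) : Int → Int → Nat → Int × Int
  | m, pk, 0 => (pk, m)
  | m, pk, fuel+1 =>
    if PySem.Int.mod m q = 0 then divOut q (PySem.Int.floordiv m q) (pk * q) fuel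
    else (pk, m)

-- A's 'for p in primes: ...' with break; none = 'computable = False'.
def scanA (N : Int) (tau : PySem.Dict Int Int) : List Int → Int → Int → Option (Int × Int)
  | [], m, result => some (m, result)
  | p :: ps, m, result =>
    if p * p > m then some (m, result)
    else if PySem.Int.mod m p = 0 then
      let pr := divOut p m 1 m.toNat
      if tau.contains pr.1 then scanA N tau ps pr.2 (result * tau.getD pr.1 0)
      else none
    else scanA N tau ps m result

def stepA (N : Int) (tp : PySem.Dict Int Int) (primes : List Int)
    (tau : PySem.Dict Int Int) (n : Int) : PySem.Dict Int Int :=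
  if tau.contains n then tau
  else
    match scanA N tau primes n 1 with
    | none => tau
    | some (m, result) =>
      if m > 1 then
        if tp.contains m then tau.insert n (result * tp.getD m 0) else tau
      else tau.insert n result

def compute_tau_sieve (N : Int) (tau_primes : List (Int × Int)) : List (Int × Int) :=
  let tp := PySem.Dict.ofList tau_primes
  let primes := PySem.List.sorted tp.keys (fun x => x) false
  ((PySem.List.pyRange 2 (N + 1) 1).foldl (stepA N tp primes) (tauPowers N tp primes)).items

-- ===== PORT B =====
-- 'spf = [0]*(N+1); for p in reversed(primes): for mult in range(p, N+1, p): spf[mult] = p'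
def sieveSpf (N : Int) (primes : List Int) : List Int :=
  primes.reverse.foldl
    (fun spf p => (PySem.List.pyRange p (N + 1) p).foldl
      (fun spf mult => PySem.List.pySetD spf mult p) spf)
    (List.replicate (N + 1).toNat 0)

-- B's 'while m > 1: q = spf[m]; if q == 0 or q*q > m: break; ...'; returns (m, result).
def factorB (spf : List Int) (tau : PySem.Dict Int Int) : Int → Int → Nat → Int × Int
  | m, result, 0 => (m, result)
  | m, result, fuel+1 =>
    if m > 1 then
      let q := PySem.List.pyGetD spf m 0
      if q = 0 ∨ q * q > m then (m, result)
      else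
        let pr := divOut q m 1 m.toNat
        factorB spf tau pr.2 (result * tau.getD pr.1 0) fuel
    else (m, result)

def stepB (tp : PySem.Dict Int Int) (spf : List Int)
    (tau : PySem.Dict Int Int) (n : Int) : PySem.Dict Int Int :=
  if tau.contains n then tau
  else
    let pr := factorB spf tau n 1 n.toNat
    if pr.1 > 1 then
      if tp.contains pr.1 then tau.insert n (pr.2 * tp.getD pr.1 0) else tau
    else tau.insert n pr.2

def compute_tau_sieve_alt (N : Int) (tau_primes : List (Int × Int)) : List (Int × Int) :=
  let tp := PySem.Dict.ofList tau_primes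
  let primes := PySem.List.sorted tp.keys (fun x => x) false
  ((PySem.List.pyRange 2 (N + 1) 1).foldl (stepB tp (sieveSpf N primes)) (tauPowers N tp primes)).items

-- ===== PRECONDITION & SPEC =====
-- Pre_ restricts the keys of tau_primes to its documented domain, primes p (we
-- only need 2 ≤ p): on key 0 A raises ZeroDivisionError (N ≥ 0), on keys 1/-1
-- it loops forever (N ≥ 2), and on other negative keys A's trial division by a
-- negative "prime" produces accidental sign-dependent entries that B's sieve
-- (meaningful only for factors ≥ 2) does not reproduce.
def Pre_compute_tau_sieve (N : Int) (tau_primes : List (Int × Int)) : Prop :=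
  ∀ p ∈ tau_primes, 2 ≤ p.1
instance (N : Int) (tau_primes : List (Int × Int)) : Decidable (Pre_compute_tau_sieve N tau_primes) := by
  unfold Pre_compute_tau_sieve; infer_instance

def pvWitness_compute_tau_sieve : Int × (List (Int × Int)) := (10, [(2, -24), (3, 252)])

def Spec_compute_tau_sieve (N : Int) (tau_primes : List (Int × Int)) (out : List (Int × Int)) : Prop := out = compute_tau_sieve_alt N tau_primes
instance (N : Int) (tau_primes : List (Int × Int)) (out : List (Int × Int)) : Decidable (Spec_compute_tau_sieve N tau_primes out) := by unfold Spec_compute_tau_sieve; infer_instance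

-- ===== CLAIM (what is proved, stated in full; the proofs are below) =====
def Claim_equal_compute_tau_sieve : Prop := ∀ (N : Int) (tau_primes : List (Int × Int)), Dom_compute_tau_sieve N tau_primes → Pre_compute_tau_sieve N tau_primes → Spec_compute_tau_sieve N tau_primes (compute_tau_sieve N tau_primes)

-- ===== LEMMAS AND PROOFS =====

-- tau contains 1 and every prime power p^a ≤ N (p from the list, a ≥ 1)
def GoodTau (N : Int) (primes : List Int) (tau : PySem.Dict Int Int) : Prop :=
  tau.contains 1 = true ∧
  ∀ p ∈ primes, ∀ a : Nat, 1 ≤ a → p ^ a ≤ N → tau.contains (p ^ a) = true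

-- smallest element of primes dividing m (0 if none), primes sorted ascending
def minDiv (primes : List Int) (m : Int) : Int :=
  (primes.find? (fun p => PySem.Int.mod m p == 0)).getD 0

lemma contains_insert_mono {d : PySem.Dict Int Int} {k k' v : Int}
    (h : d.contains k = true) : (d.insert k' v).contains k = true := by
  simp [PySem.Dict.contains_insert, h]

lemma tauPowLoop_contains_mono {N p k : Int} :
    ∀ (fuel : Nat) (pk : Int) (tau : PySem.Dict Int Int), tau.contains k = true →
      (tauPowLoop N p tau pk fuel).contains k = true := by
  intro fuel
  induction fuel with
  | zero => intro pk tau h; simpa [tauPowLoop] using h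
  | succ f ih =>
    intro pk tau h
    simp only [tauPowLoop]
    split
    · exact ih _ _ (contains_insert_mono h)
    · exact h

lemma tauPowLoop_reaches {N p : Int} (hp : 2 ≤ p) :
    ∀ (fuel : Nat) (pk : Int) (tau : PySem.Dict Int Int), 2 ≤ pk →
      (N + 1 - pk).toNat ≤ fuel → ∀ j : Nat, pk * p ^ j ≤ N →
      (tauPowLoop N p tau pk fuel).contains (pk * p ^ j) = true := by
  intro fuel
  induction fuel with
  | zero =>
    intro pk tau hpk hf j hj
    exfalso
    have hpj : (1:Int) ≤ p ^ j := one_le_pow₀ (by omega)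
    have hle : pk ≤ pk * p ^ j := le_mul_of_one_le_right (by omega) hpj
    omega
  | succ f ih =>
    intro pk tau hpk hf j hj
    have hpj : (1:Int) ≤ p ^ j := one_le_pow₀ (by omega)
    have hle : pk ≤ pk * p ^ j := le_mul_of_one_le_right (by omega) hpj
    have hpkN : pk ≤ N := le_trans hle hj
    simp only [tauPowLoop, if_pos hpkN]
    cases j with
    | zero =>
      have h1 : pk * p ^ (0:Nat) = pk := by ring
      rw [h1]
      exact tauPowLoop_contains_mono f _ _ (PySem.Dict.contains_insert_self _ _ _)
    | succ i =>
      have h1 : pk * p ^ (i+1) = (pk * p) * p ^ i := by ring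
      have h2 : pk + 1 ≤ pk * p := by nlinarith
      rw [h1]
      exact ih (pk * p) _ (by omega) (by omega) i (by rw [← h1]; exact hj)

lemma foldl_pow_contains_mono {N k : Int} {tp : PySem.Dict Int Int} :
    ∀ (l : List Int) (tau : PySem.Dict Int Int), tau.contains k = true →
      (l.foldl (fun tau p => tauPowLoop N p (tau.insert p (tp.getD p 0)) (p * p) (N + 1).toNat)
        tau).contains k = true := by
  intro l
  induction l with
  | nil => intro tau h; exact h
  | cons q t ih =>
    intro tau h
    exact ih _ (tauPowLoop_contains_mono _ _ _ (contains_insert_mono h))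

lemma foldl_pow_contains_pow {N p : Int} {tp : PySem.Dict Int Int} {a : Nat}
    (hp : 2 ≤ p) (ha : 1 ≤ a) (haN : p ^ a ≤ N) :
    ∀ (l : List Int) (tau : PySem.Dict Int Int), p ∈ l →
      (l.foldl (fun tau p => tauPowLoop N p (tau.insert p (tp.getD p 0)) (p * p) (N + 1).toNat)
        tau).contains (p ^ a) = true := by
  intro l
  induction l with
  | nil => intro tau h; cases h
  | cons q t ih =>
    intro tau hmem
    rcases List.mem_cons.mp hmem with hq | ht
    · subst hq
      simp only [List.foldl_cons]
      apply foldl_pow_contains_mono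
      rcases Nat.lt_or_ge a 2 with h1 | h1
      · have ha1 : a = 1 := by omega
        subst ha1
        have : p ^ (1:Nat) = p := by ring
        rw [this]
        exact tauPowLoop_contains_mono _ _ _ (PySem.Dict.contains_insert_self _ _ _)
      · have hsq : (4:Int) ≤ p * p := by nlinarith
        have hsplit : p ^ a = (p * p) * p ^ (a - 2) := by
          have h' : a = 2 + (a - 2) := by omega
          nth_rewrite 1 [h']
          rw [pow_add]
          ring
        rw [hsplit]
        exact tauPowLoop_reaches hp _ _ _ (by omega) (by omega) _ (by rw [← hsplit]; exact haN)
    · simp only [List.foldl_cons]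
      exact ih _ ht

lemma tauPowers_good {N : Int} {tp : PySem.Dict Int Int} {primes : List Int}
    (h2 : ∀ p ∈ primes, 2 ≤ p) : GoodTau N primes (tauPowers N tp primes) := by
  constructor
  · exact foldl_pow_contains_mono _ _ (by decide)
  · intro p hp a ha haN
    exact foldl_pow_contains_pow (h2 p hp) ha haN _ _ hp

lemma divOut_spec {q : Int} (hq : 2 ≤ q) :
    ∀ (fuel : Nat) (m pk : Int), 1 ≤ m → m.toNat ≤ fuel →
      1 ≤ (divOut q m pk fuel).2 ∧ (divOut q m pk fuel).2 ∣ m ∧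
      ¬ (q ∣ (divOut q m pk fuel).2) ∧
      (∃ a : Nat, (divOut q m pk fuel).1 = pk * q ^ a ∧ q ^ a * (divOut q m pk fuel).2 = m) ∧
      (q ∣ m → (divOut q m pk fuel).2 < m) := by
  intro fuel
  induction fuel with
  | zero => intro m pk hm hf; omega
  | succ f ih =>
    intro m pk hm hf
    by_cases hd : PySem.Int.mod m q = 0
    · have hdvd : q ∣ m := (PySem.Int.mod_eq_zero_iff_dvd m q).mp hd
      obtain ⟨c, hc⟩ := hdvd
      have hq0 : (0:Int) < q := by omega
      have hfd : PySem.Int.floordiv m q = c := by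
        rw [PySem.Int.floordiv_eq_ediv_of_pos hq0, hc, Int.mul_ediv_cancel_left _ (by omega)]
      have hc1 : 1 ≤ c := by nlinarith
      have hcm : c < m := by nlinarith
      simp only [divOut, if_pos hd, hfd]
      obtain ⟨ih1, ih2, ih3, ⟨a, iha1, iha2⟩, ih5⟩ := ih c (pk * q) hc1 (by omega)
      have hcdm : c ∣ m := ⟨q, by rw [hc]; ring⟩
      refine ⟨ih1, dvd_trans ih2 hcdm, ih3, ⟨a + 1, ?_, ?_⟩, ?_⟩
      · rw [iha1]; ring
      · rw [pow_succ, hc]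
        calc q ^ a * q * (divOut q c (pk * q) f).2
            = q * (q ^ a * (divOut q c (pk * q) f).2) := by ring
          _ = q * c := by rw [iha2]
      · intro _
        have : (divOut q c (pk * q) f).2 ≤ c := Int.le_of_dvd (by omega) ih2
        omega
    · simp only [divOut, if_neg hd]
      exact ⟨hm, dvd_refl m, fun hdv => hd ((PySem.Int.mod_eq_zero_iff_dvd m q).mpr hdv),
        ⟨0, by ring, by ring⟩, fun hdv => absurd ((PySem.Int.mod_eq_zero_iff_dvd m q).mpr hdv) hd⟩

lemma find?_min_of_sorted {l : List Int} (hs : l.Pairwise (· ≤ ·)) {m q x : Int}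
    (h : l.find? (fun p => PySem.Int.mod m p == 0) = some q)
    (hx : x ∈ l) (hdx : PySem.Int.mod m x = 0) : q ≤ x := by
  induction l with
  | nil => cases hx
  | cons y t ih =>
    by_cases hy : PySem.Int.mod m y = 0
    · have : q = y := by
        rw [List.find?_cons_of_pos (by simpa using hy)] at h
        exact (Option.some_inj.mp h).symm
      subst this
      rcases List.mem_cons.mp hx with rfl | hxt
      · exact le_refl x
      · exact (List.pairwise_cons.mp hs).1 x hxt
    · rw [List.find?_cons_of_neg (by simpa using hy)] at h
      rcases List.mem_cons.mp hx with rfl | hxt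
      · exact absurd hdx hy
      · exact ih (List.pairwise_cons.mp hs).2 h hxt

lemma foldl_pySetD_getD (v : Int) :
    ∀ (l : List Int) (arr : List Int) (i : Int), 0 ≤ i → i < (arr.length : Int) →
      (∀ x ∈ l, 0 ≤ x ∧ x < (arr.length : Int)) →
      PySem.List.pyGetD (l.foldl (fun a x => PySem.List.pySetD a x v) arr) i 0 =
        if i ∈ l then v else PySem.List.pyGetD arr i 0 := by
  intro l
  induction l with
  | nil => intro arr i _ _ _; simp
  | cons x t ih =>
    intro arr i hi0 hilen hmem
    obtain ⟨hx0, hxlen⟩ := hmem x (by simp)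
    have hlen' : ((PySem.List.pySetD arr x v).length : Int) = (arr.length : Int) := by
      rw [PySem.List.length_pySetD]
    simp only [List.foldl_cons]
    rw [ih (PySem.List.pySetD arr x v) i hi0 (by rw [hlen']; exact hilen)
      (fun y hy => by rw [hlen']; exact hmem y (by simp [hy]))]
    have hxn : x = ((x.toNat : Nat) : Int) := (Int.toNat_of_nonneg hx0).symm
    have hin : i = ((i.toNat : Nat) : Int) := (Int.toNat_of_nonneg hi0).symm
    have hset : PySem.List.pyGetD (PySem.List.pySetD arr x v) i 0 =
        if i.toNat = x.toNat then v else PySem.List.pyGetD arr ((i.toNat : Nat) : Int) 0 := by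
      conv_lhs => rw [hxn, hin]
      exact PySem.List.pyGetD_pySetD_natCast _ _ _ _ _ (by omega)
    rw [hset, ← hin]
    by_cases hit : i ∈ t
    · simp [hit]
    · by_cases hix : i = x
      · simp [hit, hix, show i.toNat = x.toNat by omega]
      · simp [hit, hix, show ¬ i.toNat = x.toNat by omega]

lemma length_foldl_pySetD (v : Int) : ∀ (l arr : List Int),
    (l.foldl (fun a x => PySem.List.pySetD a x v) arr).length = arr.length := by
  intro l
  induction l with
  | nil => intro arr; rfl
  | cons x t ih => intro arr; simp only [List.foldl_cons]; rw [ih, PySem.List.length_pySetD]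

lemma length_sieveSpf (N : Int) (primes : List Int) :
    (sieveSpf N primes).length = (N + 1).toNat := by
  suffices h : ∀ (l : List Int) (arr : List Int),
      (l.foldl (fun spf p => (PySem.List.pyRange p (N + 1) p).foldl
        (fun spf mult => PySem.List.pySetD spf mult p) spf) arr).length = arr.length by
    unfold sieveSpf
    rw [h, List.length_replicate]
  intro l
  induction l with
  | nil => intro arr; rfl
  | cons x t ih => intro arr; simp only [List.foldl_cons]; rw [ih, length_foldl_pySetD]

lemma sieveSpf_getD {N : Int} {primes : List Int} (h2 : ∀ p ∈ primes, 2 ≤ p) :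
    ∀ i : Int, 2 ≤ i → i ≤ N →
      PySem.List.pyGetD (sieveSpf N primes) i 0 = minDiv primes i := by
  induction primes with
  | nil =>
    intro i hi _
    rw [show i = ((i.toNat : Nat) : Int) by omega, PySem.List.pyGetD_natCast]
    simp [sieveSpf, minDiv, List.getD]
  | cons p ps ih =>
    intro i hi hiN
    have hp2 : (2:Int) ≤ p := h2 p (by simp)
    have hstep : sieveSpf N (p :: ps) = (PySem.List.pyRange p (N + 1) p).foldl
        (fun spf mult => PySem.List.pySetD spf mult p) (sieveSpf N ps) := by
      simp only [sieveSpf, List.reverse_cons, List.foldl_append, List.foldl_cons, List.foldl_nil]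
    have hlen : ((sieveSpf N ps).length : Int) = N + 1 := by
      rw [length_sieveSpf]
      omega
    rw [hstep, foldl_pySetD_getD p _ _ i (by omega) (by omega)
      (fun x hx => by
        obtain ⟨h1, h2', _⟩ := (PySem.List.mem_pyRange_iff_of_pos (by omega) x).mp hx
        constructor <;> omega)]
    by_cases hdp : PySem.Int.mod i p = 0
    · have hdvd : p ∣ i := (PySem.Int.mod_eq_zero_iff_dvd i p).mp hdp
      have hmem : i ∈ PySem.List.pyRange p (N + 1) p := by
        rw [PySem.List.mem_pyRange_iff_of_pos (by omega)]
        exact ⟨Int.le_of_dvd (by omega) hdvd, by omega, dvd_sub hdvd (dvd_refl p)⟩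
      rw [if_pos hmem]
      unfold minDiv
      rw [List.find?_cons_of_pos (by simpa using hdp)]
      rfl
    · have hmem : i ∉ PySem.List.pyRange p (N + 1) p := by
        intro hmem
        obtain ⟨_, _, hd⟩ := (PySem.List.mem_pyRange_iff_of_pos (by omega) i).mp hmem
        exact hdp ((PySem.Int.mod_eq_zero_iff_dvd i p).mpr (by
          have : i = (i - p) + p := by ring
          rw [this]
          exact dvd_add hd (dvd_refl p)))
      rw [if_neg hmem, ih (fun q hq => h2 q (by simp [hq])) i hi hiN]
      unfold minDiv
      rw [List.find?_cons_of_neg (by simpa using hdp)]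

lemma scan_eq_factorB {N : Int} {primes : List Int} {tau : PySem.Dict Int Int} {spf : List Int}
    (hsort : primes.Pairwise (· ≤ ·)) (h2 : ∀ p ∈ primes, 2 ≤ p)
    (hgood : GoodTau N primes tau)
    (hspf : ∀ i : Int, 2 ≤ i → i ≤ N → PySem.List.pyGetD spf i 0 = minDiv primes i) :
    ∀ (fuel : Nat) (m : Int) (l : List Int) (r : Int),
      1 ≤ m → m ≤ N → l <:+ primes →
      (∀ p ∈ primes, p ∣ m → p ∈ l) →
      m.toNat ≤ fuel →
      scanA N tau l m r = some (factorB spf tau m r fuel) := by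
  intro fuel
  induction fuel with
  | zero => intro m l r hm _ _ _ hf; omega
  | succ f ihf =>
    intro m l r hm hmN hsuf hdiv hf
    revert r hsuf hdiv
    induction l with
    | nil =>
      intro r hsuf hdiv
      simp only [scanA, factorB]
      by_cases hm1 : m > 1
      · rw [if_pos hm1]
        have hq : PySem.List.pyGetD spf m 0 = minDiv primes m := hspf m (by omega) hmN
        have hq0 : minDiv primes m = 0 := by
          unfold minDiv
          cases hfind : primes.find? (fun p => PySem.Int.mod m p == 0) with
          | none => rfl
          | some q =>
            exfalso
            have hqmem : q ∈ primes := List.mem_of_find?_eq_some hfind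
            have hqd : PySem.Int.mod m q = 0 := by simpa using List.find?_some hfind
            exact absurd (hdiv q hqmem ((PySem.Int.mod_eq_zero_iff_dvd m q).mp hqd))
              (List.not_mem_nil)
        rw [hq, hq0]
        simp
      · rw [if_neg hm1]
    | cons p ps ihl =>
      intro r hsuf hdiv
      have hpmem : p ∈ primes := hsuf.subset (by simp)
      have hp2 : (2:Int) ≤ p := h2 p hpmem
      have hpair : (p :: ps).Pairwise (· ≤ ·) := List.Pairwise.sublist hsuf.sublist hsort
      have hsuf' : ps <:+ primes := (List.suffix_cons p ps).trans hsuf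
      simp only [scanA]
      by_cases hbig : p * p > m
      · rw [if_pos hbig]
        simp only [factorB]
        by_cases hm1 : m > 1
        · rw [if_pos hm1]
          have hq : PySem.List.pyGetD spf m 0 = minDiv primes m := hspf m (by omega) hmN
          cases hfind : primes.find? (fun p => PySem.Int.mod m p == 0) with
          | none =>
            have hq0 : minDiv primes m = 0 := by unfold minDiv; rw [hfind]; rfl
            rw [hq, hq0]
            simp
          | some q =>
            have hqmem : q ∈ primes := List.mem_of_find?_eq_some hfind
            have hqd : PySem.Int.mod m q = 0 := by simpa using List.find?_some hfind
            have hql : q ∈ p :: ps := hdiv q hqmem ((PySem.Int.mod_eq_zero_iff_dvd m q).mp hqd)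
            have hpq : p ≤ q := by
              rcases List.mem_cons.mp hql with rfl | hq2
              · exact le_refl q
              · exact (List.pairwise_cons.mp hpair).1 q hq2
            have hqq : q * q > m := lt_of_lt_of_le hbig (mul_le_mul hpq hpq (by omega) (by omega))
            have hminq : minDiv primes m = q := by unfold minDiv; rw [hfind]; rfl
            rw [hq, hminq, if_pos (Or.inr hqq)]
        · rw [if_neg hm1]
      · rw [if_neg hbig]
        by_cases hdp : PySem.Int.mod m p = 0
        · rw [if_pos hdp]
          have hpd : p ∣ m := (PySem.Int.mod_eq_zero_iff_dvd m p).mp hdp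
          have hm4 : p * p ≤ m := by omega
          have hm2 : 1 < m := by nlinarith
          obtain ⟨hr1, hr2, hr3, ⟨a, ha1, ha2⟩, hr5⟩ := divOut_spec hp2 m.toNat m 1 hm (le_refl _)
          have hcont : tau.contains (divOut p m 1 m.toNat).1 = true := by
            rcases Nat.eq_zero_or_pos a with rfl | hapos
            · have h1 : (divOut p m 1 m.toNat).1 = 1 := by rw [ha1]; ring
              rw [h1]; exact hgood.1
            · have hpow_le : p ^ a ≤ m := by
                calc p ^ a ≤ p ^ a * (divOut p m 1 m.toNat).2 :=
                      le_mul_of_one_le_right (by positivity) hr1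
                  _ = m := ha2
              have h1 : (divOut p m 1 m.toNat).1 = p ^ a := by rw [ha1]; ring
              rw [h1]
              exact hgood.2 p hpmem a hapos (le_trans hpow_le hmN)
          rw [if_pos hcont]
          have hq : PySem.List.pyGetD spf m 0 = minDiv primes m := hspf m (by omega) hmN
          have hminp : minDiv primes m = p := by
            unfold minDiv
            cases hfind : primes.find? (fun x => PySem.Int.mod m x == 0) with
            | none =>
              exfalso
              have := List.find?_eq_none.mp hfind p hpmem
              simp [hdp] at this
            | some q =>
              have hqmem : q ∈ primes := List.mem_of_find?_eq_some hfind
              have hqd : PySem.Int.mod m q = 0 := by simpa using List.find?_some hfind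
              have hql : q ∈ p :: ps := hdiv q hqmem ((PySem.Int.mod_eq_zero_iff_dvd m q).mp hqd)
              have hpq : p ≤ q := by
                rcases List.mem_cons.mp hql with rfl | hq2
                · exact le_refl q
                · exact (List.pairwise_cons.mp hpair).1 q hq2
              have hqp : q ≤ p := find?_min_of_sorted hsort hfind hpmem hdp
              simp only [Option.getD_some]
              omega
          conv_rhs => rw [factorB]
          rw [if_pos hm2, hq, hminp,
            if_neg (by push_neg; exact ⟨by omega, hm4⟩)]
          have hlt : (divOut p m 1 m.toNat).2 < m := hr5 hpd
          exact ihf (divOut p m 1 m.toNat).2 ps (r * tau.getD (divOut p m 1 m.toNat).1 0)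
            hr1 (by omega) hsuf'
            (fun x hx hxd => by
              have hxm : x ∣ m := dvd_trans hxd hr2
              rcases List.mem_cons.mp (hdiv x hx hxm) with rfl | hx2
              · exact absurd hxd hr3
              · exact hx2)
            (by omega)
        · rw [if_neg hdp]
          exact ihl r hsuf'
            (fun x hx hxd => by
              rcases List.mem_cons.mp (hdiv x hx hxd) with rfl | hx2
              · exact absurd ((PySem.Int.mod_eq_zero_iff_dvd m x).mpr hxd) hdp
              · exact hx2)

lemma stepA_eq_stepB {N : Int} {tp : PySem.Dict Int Int} {primes : List Int}
    {tau : PySem.Dict Int Int} {spf : List Int} {n : Int}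
    (hsort : primes.Pairwise (· ≤ ·)) (h2 : ∀ p ∈ primes, 2 ≤ p)
    (hgood : GoodTau N primes tau)
    (hspf : ∀ i : Int, 2 ≤ i → i ≤ N → PySem.List.pyGetD spf i 0 = minDiv primes i)
    (hn : 2 ≤ n) (hN : n ≤ N) :
    stepA N tp primes tau n = stepB tp spf tau n := by
  have hscan := scan_eq_factorB hsort h2 hgood hspf n.toNat n primes 1 (by omega) hN
    List.suffix_rfl (fun p hp _ => hp) (le_refl _)
  unfold stepA stepB
  rw [hscan]

lemma goodTau_step {N : Int} {primes : List Int} {tau : PySem.Dict Int Int}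
    (h : GoodTau N primes tau) (tp : PySem.Dict Int Int) (n : Int) :
    GoodTau N primes (stepA N tp primes tau n) := by
  have hins : ∀ (k v : Int), GoodTau N primes (tau.insert k v) := fun k v =>
    ⟨contains_insert_mono h.1, fun p hp a ha haN => contains_insert_mono (h.2 p hp a ha haN)⟩
  unfold stepA
  split
  · exact h
  · split
    · exact h
    · split
      · split
        · exact hins _ _
        · exact h
      · exact hins _ _

lemma foldl_eq_of_inv {α σ : Type} (f g : σ → α → σ) (I : σ → Prop) :
    ∀ (l : List α) (s : σ), I s →
      (∀ s a, a ∈ l → I s → f s a = g s a ∧ I (f s a)) →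
      l.foldl f s = l.foldl g s := by
  intro l
  induction l with
  | nil => intro s _ _; rfl
  | cons a t ih =>
    intro s hs hstep
    have h1 := hstep s a (by simp) hs
    simp only [List.foldl_cons]
    rw [← h1.1]
    exact ih _ h1.2 (fun s b hb hI => hstep s b (by simp [hb]) hI)

-- ===== VERDICT (by name: the statement is the Claim_ definition above) =====
theorem compute_tau_sieve_spec : Claim_equal_compute_tau_sieve := by
  intro N tau_primes _ hpre
  unfold Spec_compute_tau_sieve
  simp only [compute_tau_sieve, compute_tau_sieve_alt]
  have hkeys : ∀ p ∈ (PySem.Dict.ofList tau_primes : PySem.Dict Int Int).keys,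
      p ∈ tau_primes.map Prod.fst := by
    intro p hp
    have hk : (PySem.Dict.ofList tau_primes : PySem.Dict Int Int).keys =
        PySem.Set.ofList (tau_primes.map Prod.fst) := by
      show (tau_primes.foldl (fun d q => d.insert q.1 q.2) PySem.Dict.empty).keys = _
      rw [PySem.Dict.keys_foldl_insert_key tau_primes Prod.fst (fun _ q => q.2) PySem.Dict.empty]
      rw [PySem.Dict.keys_empty]
      exact PySem.Set.update_nil_left _
    rw [hk, PySem.Set.mem_ofList] at hp
    exact hp
  have h2 : ∀ p ∈ PySem.List.sorted (PySem.Dict.ofList tau_primes :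
      PySem.Dict Int Int).keys (fun x => x) false, 2 ≤ p := by
    intro p hp
    have hp' := (PySem.List.mem_sorted _ _ _ _).mp hp
    obtain ⟨pr, hpr, hfst⟩ := List.mem_map.mp (hkeys p hp')
    have := hpre pr hpr
    omega
  have hsort : (PySem.List.sorted (PySem.Dict.ofList tau_primes :
      PySem.Dict Int Int).keys (fun x => x) false).Pairwise (· ≤ ·) := by
    simpa using PySem.List.sorted_pairwise (PySem.Dict.ofList tau_primes :
      PySem.Dict Int Int).keys (fun x => x)
  have hspf := sieveSpf_getD (N := N) h2
  congr 1
  apply foldl_eq_of_inv _ _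
    (GoodTau N (PySem.List.sorted (PySem.Dict.ofList tau_primes :
      PySem.Dict Int Int).keys (fun x => x) false))
  · exact tauPowers_good h2
  · intro tau n hn hI
    have hn' := (PySem.List.mem_pyRange_one).mp hn
    exact ⟨stepA_eq_stepB hsort h2 hI hspf (by omega) (by omega), goodTau_step hI _ _⟩
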